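-- pv_equiv track=rewrite | github.com/chosim-dvlpr/Algorithm | Python/Programmers/181851_전국_대회_선발_고사.py | solution
-- ===== SOURCE A (Python) =====
-- def solution(rank, attendance):
--     answer = 0
--     lst = [[] for _ in range(len(rank))]
--
--     for i, r in enumerate(rank):
--         lst[i] = [r, i, attendance[i]]
--     lst.sort(key=lambda x:x[0])
--
--     rnk = [0, 0, 0]
--     cnt = 0
--     for i in lst:
--         if i[2] == True:
--             rnk[cnt] = i[1]
--             cnt += 1
--             if cnt == 3:
--                 break
--     return 10000 * rnk[0] + 100 * rnk[1] + rnk[2]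
-- ===== SOURCE B (Python) =====
-- def solution(rank, attendance):
--     # Three selection passes: each pass scans indices in order and takes the
--     # not-yet-chosen attending index with the strictly smallest rank.
--     rnk = [0, 0, 0]
--     chosen = set()
--     for slot in range(3):
--         best = -1
--         for i in range(len(rank)):
--             if attendance[i] and i not in chosen and (best == -1 or rank[i] < rank[best]):
--                 best = i
--         if best == -1:
--             break
--         rnk[slot] = best
--         chosen.add(best)
--     return 10000 * rnk[0] + 100 * rnk[1] + rnk[2]
-- ===== Notes on version B (the rewrite author's own statement) =====
-- stated objective: alternative
-- what changed: Replaces build-triples + stable sort + scan-with-break by a sort-free triple selection: three passes, each scanning indices in order and picking the unchosen attending index of strictly minimal rank (lowest index on ties).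
import Mathlib
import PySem

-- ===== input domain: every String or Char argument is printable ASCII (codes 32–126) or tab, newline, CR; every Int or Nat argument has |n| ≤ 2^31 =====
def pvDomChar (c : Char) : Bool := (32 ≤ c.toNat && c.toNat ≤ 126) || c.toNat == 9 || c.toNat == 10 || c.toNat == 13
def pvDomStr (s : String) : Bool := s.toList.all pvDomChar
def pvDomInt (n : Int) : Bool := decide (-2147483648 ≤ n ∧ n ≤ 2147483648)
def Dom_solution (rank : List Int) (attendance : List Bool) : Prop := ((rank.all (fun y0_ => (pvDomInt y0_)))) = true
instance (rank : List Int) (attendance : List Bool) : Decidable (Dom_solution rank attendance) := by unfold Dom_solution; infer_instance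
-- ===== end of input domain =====

-- B replaces A's build-triples + stable sort + break-scan by three sort-free selection
-- passes (scan for the unchosen attending index of strictly minimal rank): an alternative algorithm.


-- ===== PORT A =====
-- lst after A's first loop: lst[i] = [rank[i], i, attendance[i]] (the initial empty
-- sublists are all overwritten); attendance[i] is in range under Pre_solution.
def lstOf (rank : List Int) (attendance : List Bool) : List (Int × Int × Bool) :=
  (PySem.List.enumerate rank).map (fun p => (p.2, p.1, PySem.List.pyGetD attendance p.1 false))

-- A's second loop: 'if i[2] == True: rnk[cnt] = i[1]; cnt += 1; if cnt == 3: break'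
def entLoopA : List (Int × Int × Bool) → Int × Int × Int → Nat → Int × Int × Int
  | [], rnk, _ => rnk
  | x :: t, rnk, cnt =>
    if x.2.2 == true then
      let rnk' : Int × Int × Int :=
        if cnt = 0 then (x.2.1, rnk.2.1, rnk.2.2)
        else if cnt = 1 then (rnk.1, x.2.1, rnk.2.2)
        else (rnk.1, rnk.2.1, x.2.1)
      if cnt + 1 = 3 then rnk' else entLoopA t rnk' (cnt + 1)
    else entLoopA t rnk cnt

def solution (rank : List Int) (attendance : List Bool) : Int :=
  let lst := lstOf rank attendance
  let sortedLst := PySem.List.sorted lst (fun x => x.1)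
  let rnk := entLoopA sortedLst (0, 0, 0) 0
  10000 * rnk.1 + 100 * rnk.2.1 + rnk.2.2

-- ===== PORT B =====
-- B's inner scan: the not-yet-chosen attending index with strictly minimal rank (-1 if none).
def scanB (rank : List Int) (attendance : List Bool) (chosen : PySem.Set Int) : Int :=
  (PySem.List.pyRange 0 (rank.length : Int)).foldl
    (fun best i =>
      if PySem.List.pyGetD attendance i false
          && !(PySem.Set.contains chosen i)
          && (best == (-1 : Int) || decide (PySem.List.pyGetD rank i 0 < PySem.List.pyGetD rank best 0))
      then i else best)
    (-1)

-- B's outer loop over the three slots, with the break when no candidate is left.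
def loopB (rank : List Int) (attendance : List Bool) :
    List Nat → Int × Int × Int → PySem.Set Int → Int × Int × Int
  | [], rnk, _ => rnk
  | slot :: slots, rnk, chosen =>
    let best := scanB rank attendance chosen
    if best = -1 then rnk
    else
      let rnk' : Int × Int × Int :=
        if slot = 0 then (best, rnk.2.1, rnk.2.2)
        else if slot = 1 then (rnk.1, best, rnk.2.2)
        else (rnk.1, rnk.2.1, best)
      loopB rank attendance slots rnk' (PySem.Set.add chosen best)

def solution_alt (rank : List Int) (attendance : List Bool) : Int :=
  let rnk := loopB rank attendance [0, 1, 2] (0, 0, 0) PySem.Set.empty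
  10000 * rnk.1 + 100 * rnk.2.1 + rnk.2.2

-- ===== PRECONDITION & SPEC =====
-- A evaluates attendance[i] for every i < len(rank): it raises IndexError when
-- attendance is shorter than rank; exactly those inputs are excluded.
def Pre_solution (rank : List Int) (attendance : List Bool) : Prop :=
  rank.length ≤ attendance.length
instance (rank : List Int) (attendance : List Bool) : Decidable (Pre_solution rank attendance) := by
  unfold Pre_solution; infer_instance

def pvWitness_solution : List Int × List Bool :=
  ([3, 7, 2, 8, 4], [true, false, true, true, true])

def Spec_solution (rank : List Int) (attendance : List Bool) (out : Int) : Prop := out = solution_alt rank attendance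
instance (rank : List Int) (attendance : List Bool) (out : Int) : Decidable (Spec_solution rank attendance out) := by unfold Spec_solution; infer_instance

-- ===== CLAIM (what is proved, stated in full; the proofs are below) =====
def Claim_equal_solution : Prop := ∀ (rank : List Int) (attendance : List Bool), Dom_solution rank attendance → Pre_solution rank attendance → Spec_solution rank attendance (solution rank attendance)

-- ===== LEMMAS AND PROOFS =====

-- lexicographic (rank, index) strict order on A's triples
def lexlt (a b : Int × Int × Bool) : Prop := a.1 < b.1 ∨ (a.1 = b.1 ∧ a.2.1 < b.2.1)

-- the triple an index i of the input determines
def ent (rank : List Int) (attendance : List Bool) (i : Int) : Int × Int × Bool :=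
  (PySem.List.pyGetD rank i 0, i, PySem.List.pyGetD attendance i false)

-- eligibility of index i for B's scan
abbrev eligB (attendance : List Bool) (chosen : PySem.Set Int) (i : Int) : Prop :=
  PySem.List.pyGetD attendance i false = true ∧ PySem.Set.contains chosen i = false

theorem mem_lstOf (rank : List Int) (attendance : List Bool) (x : Int × Int × Bool) :
    x ∈ lstOf rank attendance ↔ ∃ k : Nat, k < rank.length ∧ x = ent rank attendance (k : Int) := by
  simp only [lstOf, List.mem_map, PySem.List.mem_enumerate_iff]
  constructor
  · rintro ⟨p, ⟨k, hk, rfl⟩, rfl⟩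
    exact ⟨k, hk, by simp [ent, PySem.List.pyGetD_natCast, hk]⟩
  · rintro ⟨k, hk, rfl⟩
    refine ⟨((k : Int), rank[k]), ⟨k, hk, by simp⟩, ?_⟩
    simp [ent, PySem.List.pyGetD_natCast, hk]

theorem pairwise_idx_lstOf (rank : List Int) (attendance : List Bool) :
    (lstOf rank attendance).Pairwise (fun a b => a.2.1 < b.2.1) := by
  unfold lstOf
  refine List.Pairwise.map _ ?_ (PySem.List.pairwise_lt_enumerate rank 0)
  intro a b h
  simpa using h

theorem insertBy_lex_pairwise (x : Int × Int × Bool) (acc : List (Int × Int × Bool))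
    (hacc : acc.Pairwise lexlt) (hidx : ∀ a ∈ acc, a.2.1 < x.2.1) :
    (PySem.List.insertBy (fun a b => decide (a.1 < b.1)) x acc).Pairwise lexlt := by
  induction acc with
  | nil => simp [PySem.List.insertBy]
  | cons y ys ih =>
    rw [List.pairwise_cons] at hacc
    obtain ⟨hy, hys⟩ := hacc
    by_cases h : x.1 < y.1
    · rw [PySem.List.insertBy, if_pos (by simpa using h)]
      refine List.pairwise_cons.2 ⟨?_, List.pairwise_cons.2 ⟨hy, hys⟩⟩
      intro z hz
      rcases List.mem_cons.1 hz with rfl | hz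
      · exact Or.inl h
      · rcases hy z hz with h' | ⟨h', _⟩
        · exact Or.inl (lt_trans h h')
        · exact Or.inl (h' ▸ h)
    · rw [PySem.List.insertBy, if_neg (by simpa using h)]
      refine List.pairwise_cons.2 ⟨?_, ih hys (fun a ha => hidx a (List.mem_cons_of_mem _ ha))⟩
      intro z hz
      rw [PySem.List.mem_insertBy] at hz
      rcases hz with rfl | hz
      · rcases lt_or_eq_of_le (not_lt.1 h) with h' | h'
        · exact Or.inl h'
        · exact Or.inr ⟨h', hidx y (List.mem_cons_self)⟩
      · exact hy z hz

theorem foldl_insert_lex (t : List (Int × Int × Bool)) :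
    ∀ acc : List (Int × Int × Bool), t.Pairwise (fun a b => a.2.1 < b.2.1) →
      acc.Pairwise lexlt → (∀ a ∈ acc, ∀ b ∈ t, a.2.1 < b.2.1) →
      (t.foldl (fun acc x => PySem.List.insertBy (fun a b => decide (a.1 < b.1)) x acc) acc).Pairwise lexlt := by
  induction t with
  | nil => intro acc _ h _; simpa using h
  | cons x t ih =>
    intro acc hxs hacc hcross
    rw [List.pairwise_cons] at hxs
    simp only [List.foldl_cons]
    refine ih _ hxs.2 (insertBy_lex_pairwise x acc hacc
      (fun a ha => hcross a ha x List.mem_cons_self)) ?_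
    intro a ha b hb
    rw [PySem.List.mem_insertBy] at ha
    rcases ha with rfl | ha
    · exact hxs.1 b hb
    · exact hcross a ha b (List.mem_cons_of_mem _ hb)

theorem sorted_lex_pairwise (xs : List (Int × Int × Bool))
    (hxs : xs.Pairwise (fun a b => a.2.1 < b.2.1)) :
    (PySem.List.sorted xs (fun x => x.1)).Pairwise lexlt := by
  rw [PySem.List.sorted_eq_foldl_insertBy]
  exact foldl_insert_lex xs [] hxs List.Pairwise.nil (by simp)

theorem entLoopA_filter (l : List (Int × Int × Bool)) :
    ∀ (rnk : Int × Int × Int) (cnt : Nat),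
    entLoopA l rnk cnt = entLoopA (l.filter (fun x => x.2.2)) rnk cnt := by
  induction l with
  | nil => intro rnk cnt; rfl
  | cons x t ih =>
    intro rnk cnt
    by_cases h : x.2.2 = true
    · rw [List.filter_cons_of_pos (by simpa using h)]
      by_cases h3 : cnt + 1 = 3
      · simp [entLoopA, h, h3]
      · simp [entLoopA, h, h3, ih]
    · rw [List.filter_cons_of_neg (by simpa using h)]
      simp [entLoopA, h, ih]

-- the value of A's loop on an all-attending list, from slot 0
def fill3 : List (Int × Int × Bool) → Int × Int × Int
  | [] => (0, 0, 0)
  | [a] => (a.2.1, 0, 0)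
  | [a, b] => (a.2.1, b.2.1, 0)
  | a :: b :: c :: _ => (a.2.1, b.2.1, c.2.1)

theorem entLoopA_all_att (M : List (Int × Int × Bool)) (hM : ∀ x ∈ M, x.2.2 = true) :
    entLoopA M (0, 0, 0) 0 = fill3 M := by
  match M, hM with
  | [], _ => rfl
  | [a], h =>
    have ha := h a (by simp)
    simp [entLoopA, fill3, ha]
  | [a, b], h =>
    have ha := h a (by simp); have hb := h b (by simp)
    simp [entLoopA, fill3, ha, hb]
  | a :: b :: c :: t, h =>
    have ha := h a (by simp); have hb := h b (by simp); have hc := h c (by simp)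
    simp [entLoopA, fill3, ha, hb, hc]

theorem scan_step_eq (rank : List Int) (attendance : List Bool) (chosen : PySem.Set Int)
    (best i : Int) :
    (if PySem.List.pyGetD attendance i false
          && !(PySem.Set.contains chosen i)
          && (best == (-1 : Int) || decide (PySem.List.pyGetD rank i 0 < PySem.List.pyGetD rank best 0))
      then i else best)
    = if eligB attendance chosen i ∧ (best = -1 ∨ PySem.List.pyGetD rank i 0 < PySem.List.pyGetD rank best 0)
      then i else best := by
  by_cases hb1 : PySem.List.pyGetD attendance i false = true <;>
    by_cases hb2 : i ∈ (chosen : List Int) <;>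
    by_cases hb3 : best = (-1 : Int) <;>
    by_cases hb4 : PySem.List.pyGetD rank i 0 < PySem.List.pyGetD rank best 0 <;>
    simp [eligB, PySem.Set.contains, hb1, hb2, hb3, hb4]

theorem scan_fold (rank : List Int) (attendance : List Bool) (chosen : PySem.Set Int)
    (I : List Int) :
    ∀ b : Int, (∀ i ∈ I, 0 ≤ i) → (∀ i ∈ I, b < i) → I.Pairwise (· < ·) →
    (let r := I.foldl (fun best i =>
      if eligB attendance chosen i ∧ (best = -1 ∨ PySem.List.pyGetD rank i 0 < PySem.List.pyGetD rank best 0)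
      then i else best) b
    (r = b ∨ (r ∈ I ∧ eligB attendance chosen r)) ∧
    (b ≠ -1 → r ≠ -1 ∧ PySem.List.pyGetD rank r 0 ≤ PySem.List.pyGetD rank b 0 ∧
      (PySem.List.pyGetD rank r 0 = PySem.List.pyGetD rank b 0 → r ≤ b)) ∧
    (∀ i ∈ I, eligB attendance chosen i → r ≠ -1 ∧
      (PySem.List.pyGetD rank r 0 < PySem.List.pyGetD rank i 0 ∨
       (PySem.List.pyGetD rank r 0 = PySem.List.pyGetD rank i 0 ∧ r ≤ i)))) := by
  induction I with
  | nil =>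
    intro b _ _ _
    exact ⟨Or.inl rfl, fun hb => ⟨hb, le_refl _, fun _ => le_refl _⟩, by simp⟩
  | cons x I ih =>
    intro b hpos hlt hpw
    have hpw' := (List.pairwise_cons.1 hpw)
    have hposx : (0:Int) ≤ x := hpos x List.mem_cons_self
    have hxne : x ≠ -1 := by omega
    simp only [List.foldl_cons]
    by_cases hc : eligB attendance chosen x ∧ (b = -1 ∨ PySem.List.pyGetD rank x 0 < PySem.List.pyGetD rank b 0)
    · rw [if_pos hc]
      obtain ⟨he, hr⟩ := hc
      obtain ⟨ih1, ih2, ih3⟩ := ih x (fun i hi => hpos i (List.mem_cons_of_mem _ hi))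
        (fun i hi => hpw'.1 i hi) hpw'.2
      obtain ⟨hr1, hr2, hr3⟩ := ih2 hxne
      refine ⟨?_, ?_, ?_⟩
      · rcases ih1 with h | ⟨h, h'⟩
        · refine Or.inr ⟨?_, ?_⟩
          · rw [h]; exact List.mem_cons_self
          · rw [h]; exact he
        · exact Or.inr ⟨List.mem_cons_of_mem _ h, h'⟩
      · intro hb
        have hbx : PySem.List.pyGetD rank x 0 < PySem.List.pyGetD rank b 0 := by
          rcases hr with hr | hr
          · exact absurd hr hb
          · exact hr
        exact ⟨hr1, le_of_lt (lt_of_le_of_lt hr2 hbx),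
          fun h => absurd h (ne_of_lt (lt_of_le_of_lt hr2 hbx))⟩
      · intro i hi hei
        rcases List.mem_cons.1 hi with rfl | hi
        · rcases lt_or_eq_of_le hr2 with h | h
          · exact ⟨hr1, Or.inl h⟩
          · exact ⟨hr1, Or.inr ⟨h, hr3 h⟩⟩
        · exact ih3 i hi hei
    · rw [if_neg hc]
      obtain ⟨ih1, ih2, ih3⟩ := ih b (fun i hi => hpos i (List.mem_cons_of_mem _ hi))
        (fun i hi => hlt i (List.mem_cons_of_mem _ hi)) hpw'.2
      refine ⟨?_, ih2, ?_⟩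
      · rcases ih1 with h | ⟨h, h'⟩
        · exact Or.inl h
        · exact Or.inr ⟨List.mem_cons_of_mem _ h, h'⟩
      · intro i hi hei
        rcases List.mem_cons.1 hi with rfl | hi
        · have hnb : ¬(b = -1 ∨ PySem.List.pyGetD rank i 0 < PySem.List.pyGetD rank b 0) :=
            fun h => hc ⟨hei, h⟩
          push_neg at hnb
          obtain ⟨hb1, hb2⟩ := hnb
          obtain ⟨hr1, hr2, hr3⟩ := ih2 hb1
          rcases lt_or_eq_of_le (le_trans hr2 hb2) with h | h
          · exact ⟨hr1, Or.inl h⟩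
          · refine ⟨hr1, Or.inr ⟨h, ?_⟩⟩
            have hbi : b < i := hlt i List.mem_cons_self
            have := hr3 (by omega)
            omega
        · exact ih3 i hi hei

theorem pairwise_lt_pyRange (n : Nat) : (PySem.List.pyRange 0 (n : Int)).Pairwise (· < ·) := by
  rw [PySem.List.pyRange_zero_natCast]
  refine List.Pairwise.map _ (fun a b h => ?_) (List.pairwise_lt_range)
  exact_mod_cast h

-- characterization of B's scan against the lex-sorted attending list M = P ++ D,
-- with exactly the indices of P already chosen: it returns the head index of D (or -1)
theorem scanB_char (rank : List Int) (attendance : List Bool)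
    (M P D : List (Int × Int × Bool))
    (hM : M = P ++ D)
    (hMent : ∀ x ∈ M, x = ent rank attendance x.2.1 ∧ 0 ≤ x.2.1 ∧ x.2.1 < (rank.length : Int) ∧ x.2.2 = true)
    (hMlex : M.Pairwise lexlt)
    (hMperm : M.Perm ((lstOf rank attendance).filter (fun x => x.2.2))) :
    scanB rank attendance (P.map (fun x => x.2.1)) =
      (match D with | [] => -1 | m :: _ => m.2.1) := by
  have hPfilter : ((lstOf rank attendance).filter (fun x => x.2.2)).Pairwise (fun a b => a.2.1 < b.2.1) :=
    (pairwise_idx_lstOf rank attendance).sublist List.filter_sublist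
  have hMne : M.Pairwise (fun a b => a.2.1 ≠ b.2.1) := by
    have h2 : (((lstOf rank attendance).filter (fun x => x.2.2)).map (fun x => x.2.1)).Nodup :=
      (List.pairwise_map.2 hPfilter).imp (fun h => ne_of_lt h)
    exact List.pairwise_map.1 ((hMperm.map _).nodup_iff.2 h2)
  have hE : ∀ i : Int, ((0 ≤ i ∧ i < (rank.length : Int)) ∧
      eligB attendance (P.map (fun x => x.2.1)) i) ↔ ent rank attendance i ∈ D := by
    intro i
    constructor
    · rintro ⟨⟨h0, hn⟩, hatt, hcont⟩
      have hmem : ent rank attendance i ∈ lstOf rank attendance := by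
        refine (mem_lstOf rank attendance _).2 ⟨i.toNat, by omega, ?_⟩
        rw [Int.toNat_of_nonneg h0]
      have hfil : ent rank attendance i ∈ (lstOf rank attendance).filter (fun x => x.2.2) :=
        List.mem_filter.2 ⟨hmem, by simpa [ent] using hatt⟩
      have hMm : ent rank attendance i ∈ M := hMperm.mem_iff.2 hfil
      rw [hM, List.mem_append] at hMm
      rcases hMm with hP | hD
      · exfalso
        simp only [PySem.Set.contains] at hcont
        have hin : i ∈ P.map (fun x => x.2.1) :=
          List.mem_map.2 ⟨ent rank attendance i, hP, rfl⟩
        simp [hin] at hcont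
      · exact hD
    · intro hD
      have hMm : ent rank attendance i ∈ M := by
        rw [hM, List.mem_append]; exact Or.inr hD
      obtain ⟨_, h0, hn, hatt⟩ := hMent _ hMm
      refine ⟨⟨h0, hn⟩, hatt, ?_⟩
      simp only [PySem.Set.contains]
      have hnin : i ∉ P.map (fun x => x.2.1) := by
        intro hPm
        obtain ⟨p, hp, hpi⟩ := List.mem_map.1 hPm
        have hcross := (List.pairwise_append.1 (hM ▸ hMne)).2.2 p hp _ hD
        simp [ent] at hcross
        exact hcross hpi
      simp [hnin]
  have hfun : (fun (best i : Int) =>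
      if PySem.List.pyGetD attendance i false
          && !(PySem.Set.contains (P.map (fun x => x.2.1)) i)
          && (best == (-1 : Int) || decide (PySem.List.pyGetD rank i 0 < PySem.List.pyGetD rank best 0))
      then i else best)
      = (fun (best i : Int) =>
      if eligB attendance (P.map (fun x => x.2.1)) i ∧
          (best = -1 ∨ PySem.List.pyGetD rank i 0 < PySem.List.pyGetD rank best 0)
      then i else best) :=
    funext fun best => funext fun i => scan_step_eq rank attendance _ best i
  rw [scanB, hfun]
  obtain ⟨c1, c2, c3⟩ := scan_fold rank attendance (P.map (fun x => x.2.1))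
    (PySem.List.pyRange 0 (rank.length : Int)) (-1)
    (fun i hi => (PySem.List.mem_pyRange_one.1 hi).1)
    (fun i hi => by have := (PySem.List.mem_pyRange_one.1 hi).1; omega)
    (pairwise_lt_pyRange rank.length)
  set r := (PySem.List.pyRange 0 (rank.length : Int)).foldl (fun best i =>
      if eligB attendance (P.map (fun x => x.2.1)) i ∧
          (best = -1 ∨ PySem.List.pyGetD rank i 0 < PySem.List.pyGetD rank best 0)
      then i else best) (-1) with hrdef
  match D, hE with
  | [], hE =>
    rcases c1 with h | ⟨hrI, hre⟩
    · exact h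
    · exfalso
      have hb := PySem.List.mem_pyRange_one.1 hrI
      exact absurd ((hE r).1 ⟨⟨hb.1, hb.2⟩, hre⟩) (List.not_mem_nil)
  | m :: D', hE =>
    have hmM : m ∈ M := by rw [hM, List.mem_append]; exact Or.inr List.mem_cons_self
    obtain ⟨hm_ent, hm0, hmn, _⟩ := hMent _ hmM
    have hjI : m.2.1 ∈ PySem.List.pyRange 0 (rank.length : Int) :=
      PySem.List.mem_pyRange_one.2 ⟨hm0, hmn⟩
    have hentj : ent rank attendance m.2.1 = m := hm_ent.symm
    have hjel := (hE m.2.1).2 (by rw [hentj]; exact List.mem_cons_self)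
    obtain ⟨hr1, hlex⟩ := c3 m.2.1 hjI hjel.2
    rcases c1 with h | ⟨hrI, hre⟩
    · exact absurd h hr1
    · have hb := PySem.List.mem_pyRange_one.1 hrI
      have hDr : ent rank attendance r ∈ m :: D' := (hE r).1 ⟨⟨hb.1, hb.2⟩, hre⟩
      rcases List.mem_cons.1 hDr with heq | htail
      · have hq : (ent rank attendance r).2.1 = m.2.1 := by rw [heq]
        simpa [ent] using hq
      · exfalso
        have hDlex : (m :: D').Pairwise lexlt := (List.pairwise_append.1 (hM ▸ hMlex)).2.1
        have hml := (List.pairwise_cons.1 hDlex).1 _ htail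
        have hm1 : m.1 = PySem.List.pyGetD rank m.2.1 0 := by rw [hm_ent]; rfl
        have he1 : (ent rank attendance r).1 = PySem.List.pyGetD rank r 0 := rfl
        have he2 : (ent rank attendance r).2.1 = r := rfl
        unfold lexlt at hml
        rw [hm1, he1, he2] at hml
        rcases hml with h | ⟨h1, h2⟩ <;> rcases hlex with h' | ⟨h1', h2'⟩ <;> omega

theorem loopB_eq_fill3 (rank : List Int) (attendance : List Bool)
    (M : List (Int × Int × Bool))
    (hMent : ∀ x ∈ M, x = ent rank attendance x.2.1 ∧ 0 ≤ x.2.1 ∧ x.2.1 < (rank.length : Int) ∧ x.2.2 = true)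
    (hMlex : M.Pairwise lexlt)
    (hMperm : M.Perm ((lstOf rank attendance).filter (fun x => x.2.2))) :
    loopB rank attendance [0, 1, 2] (0, 0, 0) PySem.Set.empty = fill3 M := by
  have hMne : M.Pairwise (fun a b => a.2.1 ≠ b.2.1) := by
    have hPfilter : ((lstOf rank attendance).filter (fun x => x.2.2)).Pairwise (fun a b => a.2.1 < b.2.1) :=
      (pairwise_idx_lstOf rank attendance).sublist List.filter_sublist
    have h2 : (((lstOf rank attendance).filter (fun x => x.2.2)).map (fun x => x.2.1)).Nodup :=
      (List.pairwise_map.2 hPfilter).imp (fun h => ne_of_lt h)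
    exact List.pairwise_map.1 ((hMperm.map _).nodup_iff.2 h2)
  match M, hMent, hMlex, hMperm, hMne with
  | [], hMent, hMlex, hMperm, hMne =>
    have hs0 : scanB rank attendance ([] : List Int) = -1 :=
      scanB_char rank attendance [] [] [] rfl hMent hMlex hMperm
    simp [loopB, hs0, fill3]
  | [a], hMent, hMlex, hMperm, hMne =>
    obtain ⟨ha_ent, ha0, han, _⟩ := hMent a (by simp)
    have hane : a.2.1 ≠ -1 := by omega
    have hs0 : scanB rank attendance ([] : List Int) = a.2.1 :=
      scanB_char rank attendance [a] [] [a] rfl hMent hMlex hMperm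
    have hs1 : scanB rank attendance [a.2.1] = -1 :=
      scanB_char rank attendance [a] [a] [] (by simp) hMent hMlex hMperm
    simp [loopB, hs0, hane, hs1, fill3]
  | [a, b], hMent, hMlex, hMperm, hMne =>
    obtain ⟨ha_ent, ha0, han, _⟩ := hMent a (by simp)
    obtain ⟨hb_ent, hb0, hbn, _⟩ := hMent b (by simp)
    have hane : a.2.1 ≠ -1 := by omega
    have hbne : b.2.1 ≠ -1 := by omega
    have hab : a.2.1 ≠ b.2.1 := (List.pairwise_cons.1 hMne).1 b (by simp)
    have hs0 : scanB rank attendance ([] : List Int) = a.2.1 :=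
      scanB_char rank attendance [a, b] [] [a, b] rfl hMent hMlex hMperm
    have hs1 : scanB rank attendance [a.2.1] = b.2.1 :=
      scanB_char rank attendance [a, b] [a] [b] rfl hMent hMlex hMperm
    have hch2 : PySem.Set.add [a.2.1] b.2.1 = [a.2.1, b.2.1] := by
      simp [PySem.Set.add, PySem.Set.contains, Ne.symm hab]
    have hs2 : scanB rank attendance [a.2.1, b.2.1] = -1 :=
      scanB_char rank attendance [a, b] [a, b] [] (by simp) hMent hMlex hMperm
    simp [loopB, hs0, hane, hs1, hbne, hch2, hs2, fill3]
  | a :: b :: c :: rest, hMent, hMlex, hMperm, hMne =>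
    obtain ⟨ha_ent, ha0, han, _⟩ := hMent a (by simp)
    obtain ⟨hb_ent, hb0, hbn, _⟩ := hMent b (by simp)
    obtain ⟨hc_ent, hc0, hcn, _⟩ := hMent c (by simp)
    have hane : a.2.1 ≠ -1 := by omega
    have hbne : b.2.1 ≠ -1 := by omega
    have hcne : c.2.1 ≠ -1 := by omega
    have hab : a.2.1 ≠ b.2.1 := (List.pairwise_cons.1 hMne).1 b (by simp)
    have hs0 : scanB rank attendance ([] : List Int) = a.2.1 :=
      scanB_char rank attendance (a :: b :: c :: rest) [] (a :: b :: c :: rest) rfl hMent hMlex hMperm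
    have hs1 : scanB rank attendance [a.2.1] = b.2.1 :=
      scanB_char rank attendance (a :: b :: c :: rest) [a] (b :: c :: rest) rfl hMent hMlex hMperm
    have hch2 : PySem.Set.add [a.2.1] b.2.1 = [a.2.1, b.2.1] := by
      simp [PySem.Set.add, PySem.Set.contains, Ne.symm hab]
    have hs2 : scanB rank attendance [a.2.1, b.2.1] = c.2.1 :=
      scanB_char rank attendance (a :: b :: c :: rest) [a, b] (c :: rest) rfl hMent hMlex hMperm
    simp [loopB, hs0, hane, hs1, hbne, hch2, hs2, hcne, fill3]

-- ===== VERDICT (by name: the statement is the Claim_ definition above) =====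
theorem solution_spec : Claim_equal_solution := by
  intro rank attendance hdom hpre
  unfold Spec_solution
  have hMent : ∀ x ∈ (PySem.List.sorted (lstOf rank attendance) (fun x => x.1)).filter (fun x => x.2.2),
      x = ent rank attendance x.2.1 ∧ 0 ≤ x.2.1 ∧ x.2.1 < (rank.length : Int) ∧ x.2.2 = true := by
    intro x hx
    have hxf := List.mem_filter.1 hx
    have hxl : x ∈ lstOf rank attendance := (PySem.List.mem_sorted _ _ _ _).1 hxf.1
    obtain ⟨k, hk, hxe⟩ := (mem_lstOf rank attendance x).1 hxl
    subst hxe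
    refine ⟨rfl, Int.natCast_nonneg k, ?_, by simpa using hxf.2⟩
    show (k : Int) < (rank.length : Int)
    exact_mod_cast hk
  have hMlex : ((PySem.List.sorted (lstOf rank attendance) (fun x => x.1)).filter (fun x => x.2.2)).Pairwise lexlt :=
    (sorted_lex_pairwise (lstOf rank attendance) (pairwise_idx_lstOf rank attendance)).sublist List.filter_sublist
  have hMperm : ((PySem.List.sorted (lstOf rank attendance) (fun x => x.1)).filter (fun x => x.2.2)).Perm
      ((lstOf rank attendance).filter (fun x => x.2.2)) :=
    (PySem.List.sorted_perm (lstOf rank attendance) (fun x => x.1) false).filter _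
  have hatt : ∀ x ∈ (PySem.List.sorted (lstOf rank attendance) (fun x => x.1)).filter (fun x => x.2.2),
      x.2.2 = true := fun x hx => by simpa using (List.mem_filter.1 hx).2
  have hA : solution rank attendance =
      10000 * (fill3 ((PySem.List.sorted (lstOf rank attendance) (fun x => x.1)).filter (fun x => x.2.2))).1
      + 100 * (fill3 ((PySem.List.sorted (lstOf rank attendance) (fun x => x.1)).filter (fun x => x.2.2))).2.1
      + (fill3 ((PySem.List.sorted (lstOf rank attendance) (fun x => x.1)).filter (fun x => x.2.2))).2.2 := by
    simp only [solution]
    rw [entLoopA_filter, entLoopA_all_att _ hatt]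
  have hB : solution_alt rank attendance =
      10000 * (fill3 ((PySem.List.sorted (lstOf rank attendance) (fun x => x.1)).filter (fun x => x.2.2))).1
      + 100 * (fill3 ((PySem.List.sorted (lstOf rank attendance) (fun x => x.1)).filter (fun x => x.2.2))).2.1
      + (fill3 ((PySem.List.sorted (lstOf rank attendance) (fun x => x.1)).filter (fun x => x.2.2))).2.2 := by
    simp only [solution_alt]
    rw [loopB_eq_fill3 rank attendance _ hMent hMlex hMperm]
  rw [hA, hB]
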